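-- pv_equiv track=rewrite | github.com/Alumzifan/Hier-SFL | client_program.py | dataset_non_iid
-- ===== SOURCE A (Python) =====
-- def dataset_non_iid(X_feature, y_label, num_clients):
--     y_label = list(y_label)
--     num_benigns = int(y_label.count(0) / num_clients)
--     dict_users = {}
--     dict_users[0] = set(i for i in range(len(X_feature)) if y_label[i] == 1 or y_label[i] == 2)
--     dict_users[1] = set(i for i in range(len(X_feature)) if y_label[i] == 3 or y_label[i] == 4)
--     dict_users[2] = set(i for i in range(len(X_feature)) if y_label[i] == 5 or y_label[i] == 6)
--     dict_users[3] = set(i for i in range(len(X_feature)) if y_label[i] == 7)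
--     count = 0
--     for i in range(num_clients):
--         for j in range(num_benigns):
--             while y_label[count] != 0:
--                 count += 1
--             if count != len(X_feature) - 1:
--                 dict_users[i].add(count)
--             count += 1
--         if len(X_feature) - 1 in dict_users[i]:
--             dict_users[i].discard(len(X_feature) - 1)
--     # while count <= len(y_label) - 1:
--     #     while y_label[count] != 0:
--     #         count += 1
--     #     dict_users[3].add(count)
--     #     count += 1
--     return dict_users
-- ===== SOURCE B (Python) =====
-- def dataset_non_iid(X_feature, y_label, num_clients):
--     y = list(y_label)
--     n = len(X_feature)
--     dict_users = {
--         0: {i for i in range(n) if y[i] == 1 or y[i] == 2},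
--         1: {i for i in range(n) if y[i] == 3 or y[i] == 4},
--         2: {i for i in range(n) if y[i] == 5 or y[i] == 6},
--         3: {i for i in range(n) if y[i] == 7},
--     }
--     zeros = [i for i, v in enumerate(y) if v == 0]
--     num_benigns = int(len(zeros) / num_clients)
--     for i in range(num_clients):
--         dict_users[i].update(zeros[i * num_benigns:(i + 1) * num_benigns])
--         dict_users[i].discard(n - 1)
--     return dict_users
-- ===== Notes on version B (the rewrite author's own statement) =====
-- stated objective: simpler
-- what changed: B replaces A's stateful while-loop pointer scan (which re-walks the label list to find each next benign sample) with a single precomputed ascending list of label-0 indices that is sliced into one contiguous block per client, and folds A's conditional add plus membership-tested discard into a plain update-then-discard.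
import Mathlib
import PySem

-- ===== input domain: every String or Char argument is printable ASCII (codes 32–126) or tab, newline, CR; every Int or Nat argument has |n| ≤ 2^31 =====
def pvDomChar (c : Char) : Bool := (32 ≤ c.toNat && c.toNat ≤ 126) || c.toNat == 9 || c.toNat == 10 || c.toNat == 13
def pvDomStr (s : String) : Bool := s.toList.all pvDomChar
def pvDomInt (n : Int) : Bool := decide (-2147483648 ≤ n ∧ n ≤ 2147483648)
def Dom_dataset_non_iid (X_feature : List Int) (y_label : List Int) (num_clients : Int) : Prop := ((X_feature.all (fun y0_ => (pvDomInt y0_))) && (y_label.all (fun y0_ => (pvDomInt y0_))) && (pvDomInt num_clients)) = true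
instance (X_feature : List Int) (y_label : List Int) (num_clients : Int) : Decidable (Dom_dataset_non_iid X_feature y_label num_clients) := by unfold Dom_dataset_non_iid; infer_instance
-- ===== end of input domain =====

-- B replaces A's while-loop pointer scan over the labels with a precomputed ascending
-- list of benign (label-0) indices that is sliced into one contiguous block per client
-- (objective: simpler). Return-value equivalence only: the Python A mutates nothing observable.

-- shared helper (identical code in both Pythons): the four label-based index sets, keys 0..3
def pvLabelDict (X_feature y_label : List Int) : PySem.Dict Int (PySem.Set Int) :=
  let mk : (Int → Bool) → PySem.Set Int := fun p =>
    (PySem.List.pyRange 0 X_feature.length 1).foldl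
      (fun s i => if p (PySem.List.pyGetD y_label i 0) then PySem.Set.add s i else s)
      PySem.Set.empty
  ((((PySem.Dict.empty).insert 0 (mk (fun v => v == 1 || v == 2))).insert 1
      (mk (fun v => v == 3 || v == 4))).insert 2
      (mk (fun v => v == 5 || v == 6))).insert 3 (mk (fun v => v == 7))

-- ===== PORT A =====
-- `while y_label[count] != 0: count += 1` (fuel only makes it total; none = IndexError)
def pyFindZero (y : List Int) : Nat → Int → Option Int
  | 0, _ => none
  | fuel + 1, c =>
    match PySem.List.pyGet? y c with
    | none => none
    | some v => if v = 0 then some c else pyFindZero y fuel (c + 1)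

-- body of the inner `for j in range(num_benigns)` loop: state = (dict_users[i], count)
def pvAStep (y : List Int) (last : Int) :
    Option (PySem.Set Int × Int) → Option (PySem.Set Int × Int)
  | none => none
  | some (s, c) =>
    match pyFindZero y (y.length + 1) c with
    | none => none
    | some z => some ((if z ≠ last then PySem.Set.add s z else s), z + 1)

-- body of the outer `for i in range(num_clients)` loop (none = KeyError on dict_users[i])
def pvAClient (y : List Int) (last nb : Int)
    (st : Option (PySem.Dict Int (PySem.Set Int) × Int)) (i : Int) :
    Option (PySem.Dict Int (PySem.Set Int) × Int) :=
  match st with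
  | none => none
  | some (d, c) =>
    match d.get? i with
    | none => none
    | some s =>
      match (PySem.List.pyRange 0 nb 1).foldl (fun acc _ => pvAStep y last acc) (some (s, c)) with
      | none => none
      | some (s', c') =>
        some (d.insert i (if PySem.Set.contains s' last then PySem.Set.discard s' last else s'), c')

def dataset_non_iid (X_feature : List Int) (y_label : List Int) (num_clients : Int) : List (Int × List Int) :=
  if num_clients = 0 then []            -- ZeroDivisionError in Python
  else if X_feature.length ≤ y_label.length then
    let nb : Int := PySem.Int.truncdiv (PySem.List.count y_label 0) num_clients
    let d0 := pvLabelDict X_feature y_label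
    match (PySem.List.pyRange 0 num_clients 1).foldl
        (pvAClient y_label ((X_feature.length : Int) - 1) nb) (some (d0, 0)) with
    | some (d, _) => d.items
    | none => []                        -- KeyError / IndexError in Python
  else []                               -- IndexError in Python

-- ===== PORT B =====
-- `zeros = [i for i, v in enumerate(y) if v == 0]`
def pvZeros (y : List Int) : List Int :=
  ((PySem.List.enumerate y 0).filter (fun p => p.2 == 0)).map (fun p => p.1)

-- body of B's `for i in range(num_clients)` loop
def pvBClient (zeros : List Int) (last nb : Int)
    (st : Option (PySem.Dict Int (PySem.Set Int))) (i : Int) :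
    Option (PySem.Dict Int (PySem.Set Int)) :=
  match st with
  | none => none
  | some d =>
    match d.get? i with
    | none => none
    | some s =>
      some (d.insert i (PySem.Set.discard
        (PySem.Set.update s (PySem.List.slice zeros (some (i * nb)) (some ((i + 1) * nb)))) last))

def dataset_non_iid_alt (X_feature : List Int) (y_label : List Int) (num_clients : Int) : List (Int × List Int) :=
  if num_clients = 0 then []            -- ZeroDivisionError in Python
  else if X_feature.length ≤ y_label.length then
    let zeros := pvZeros y_label
    let nb : Int := PySem.Int.truncdiv (zeros.length : Int) num_clients
    let d0 := pvLabelDict X_feature y_label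
    match (PySem.List.pyRange 0 num_clients 1).foldl
        (pvBClient zeros ((X_feature.length : Int) - 1) nb) (some d0) with
    | some d => d.items
    | none => []                        -- KeyError in Python
  else []                               -- IndexError in Python

-- ===== PRECONDITION & SPEC =====
-- Pre_ excludes exactly the inputs where A raises: num_clients = 0 (ZeroDivisionError),
-- num_clients > 4 (KeyError on dict_users[4]), and y_label shorter than X_feature (IndexError).
def Pre_dataset_non_iid (X_feature : List Int) (y_label : List Int) (num_clients : Int) : Prop :=
  num_clients ≠ 0 ∧ num_clients ≤ 4 ∧ X_feature.length ≤ y_label.length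
instance (X_feature : List Int) (y_label : List Int) (num_clients : Int) : Decidable (Pre_dataset_non_iid X_feature y_label num_clients) := by unfold Pre_dataset_non_iid; infer_instance

def pvWitness_dataset_non_iid : List Int × List Int × Int := ([5, 6, 7, 8], [1, 0, 0, 7], 2)

def Spec_dataset_non_iid (X_feature : List Int) (y_label : List Int) (num_clients : Int) (out : List (Int × List Int)) : Prop := out = dataset_non_iid_alt X_feature y_label num_clients
instance (X_feature : List Int) (y_label : List Int) (num_clients : Int) (out : List (Int × List Int)) : Decidable (Spec_dataset_non_iid X_feature y_label num_clients out) := by unfold Spec_dataset_non_iid; infer_instance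

-- ===== CLAIM (what is proved, stated in full; the proofs are below) =====
def Claim_equal_dataset_non_iid : Prop := ∀ (X_feature : List Int) (y_label : List Int) (num_clients : Int), Dom_dataset_non_iid X_feature y_label num_clients → Pre_dataset_non_iid X_feature y_label num_clients → Spec_dataset_non_iid X_feature y_label num_clients (dataset_non_iid X_feature y_label num_clients)

-- ===== LEMMAS AND PROOFS =====

theorem pvZerosAux_mem (y : List Int) (s z : Int) :
    z ∈ ((PySem.List.enumerate y s).filter (fun p => p.2 == 0)).map (fun p => p.1) ↔
      ∃ k : Nat, k < y.length ∧ z = s + k ∧ y[k]? = some 0 := by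
  induction y generalizing s with
  | nil => simp [PySem.List.enumerate]
  | cons a t ih =>
    rw [PySem.List.enumerate_cons]
    simp only [List.filter_cons]
    by_cases ha : a = 0
    · subst ha
      simp only [beq_self_eq_true, if_pos, List.map_cons, List.mem_cons, ih]
      constructor
      · rintro (rfl | ⟨k, hk, rfl, hy⟩)
        · exact ⟨0, by simp, by simp, by simp⟩
        · exact ⟨k + 1, by simpa using hk, by push_cast; ring, by simpa using hy⟩
      · rintro ⟨k, hk, rfl, hy⟩
        cases k with
        | zero => left; simp
        | succ k => right; exact ⟨k, by simpa using hk, by push_cast; ring, by simpa using hy⟩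
    · simp only [show (a == 0) = false by simpa using ha, Bool.false_eq_true, if_false, ih]
      constructor
      · rintro ⟨k, hk, rfl, hy⟩
        exact ⟨k + 1, by simpa using hk, by push_cast; ring, by simpa using hy⟩
      · rintro ⟨k, hk, rfl, hy⟩
        cases k with
        | zero => simp at hy; exact absurd hy ha
        | succ k => exact ⟨k, by simpa using hk, by push_cast; ring, by simpa using hy⟩

theorem pvZeros_mem (y : List Int) (z : Int) :
    z ∈ pvZeros y ↔ ∃ k : Nat, k < y.length ∧ z = k ∧ y[k]? = some 0 := by
  unfold pvZeros; rw [pvZerosAux_mem]; simp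

theorem pvZerosAux_pairwise (y : List Int) (s : Int) :
    (((PySem.List.enumerate y s).filter (fun p => p.2 == 0)).map (fun p => p.1)).Pairwise (· < ·) := by
  have h : (((PySem.List.enumerate y s).filter (fun p => p.2 == 0)).map (fun p => p.1)).Sublist
      ((PySem.List.enumerate y s).map (fun p => p.1)) := List.Sublist.map _ (List.filter_sublist)
  have h2 : ((PySem.List.enumerate y s).map (fun p => p.1)).Pairwise (· < ·) := by
    rw [show (fun p : Int × Int => p.1) = Prod.fst from rfl, PySem.List.map_fst_enumerate]
    exact PySem.List.pairwise_lt_pyRange_one _ _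
  exact h2.sublist h

theorem pvZeros_pairwise (y : List Int) : (pvZeros y).Pairwise (· < ·) := pvZerosAux_pairwise y 0

theorem pvZeros_length (y : List Int) : ((pvZeros y).length : Int) = (PySem.List.count y 0 : Int) := by
  rw [PySem.List.count_eq]
  unfold pvZeros
  congr 1
  rw [List.length_map, ← List.countP_eq_length_filter, List.count_eq_countP]
  have : ∀ s : Int, (List.countP (fun p => p.2 == 0) (PySem.List.enumerate y s)) = List.countP (fun x => x == 0) y := by
    intro s
    induction y generalizing s with
    | nil => simp [PySem.List.enumerate]
    | cons a t ih =>
      rw [PySem.List.enumerate_cons]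
      simp [List.countP_cons, ih]
  exact this 0

theorem pvHead_filter (l : List Int) (hl : l.Pairwise (· < ·)) (c : Int) (hc : c ∈ l) :
    (l.filter (fun z => decide (c ≤ z))).head? = some c := by
  induction l with
  | nil => simp at hc
  | cons a t ih =>
    rcases List.mem_cons.mp hc with rfl | hct
    · simp [List.filter_cons]
    · have hac : a < c := (List.pairwise_cons.mp hl).1 c hct
      rw [List.filter_cons, if_neg (by simp; omega)]
      exact ih (List.pairwise_cons.mp hl).2 hct

theorem pvFilter_gt_drop (l : List Int) (hl : l.Pairwise (· < ·)) (t : Nat) (ht : t < l.length) :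
    l.filter (fun z => decide (l[t] < z)) = l.drop (t + 1) := by
  have hget := List.pairwise_iff_getElem.mp hl
  obtain ⟨x, hx⟩ : ∃ x, l[t] = x := ⟨l[t], rfl⟩
  rw [hx]
  conv_lhs => rw [← List.take_append_drop (t + 1) l]
  rw [List.filter_append]
  have h1 : (l.take (t + 1)).filter (fun z => decide (x < z)) = [] := by
    rw [List.filter_eq_nil_iff]
    intro a ha
    obtain ⟨j, hj, rfl⟩ := List.mem_take_iff_getElem.mp ha
    by_cases hjt : j = t
    · subst hjt; simp [← hx]
    · have hjl : j < t := by omega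
      have := hget j t (by omega) ht hjl
      simp; omega
  have h2 : (l.drop (t + 1)).filter (fun z => decide (x < z)) = l.drop (t + 1) := by
    rw [List.filter_eq_self]
    intro a ha
    obtain ⟨j, hj, rfl⟩ := List.mem_drop_iff_getElem.mp ha
    have := hget t (t + 1 + j) ht (by omega) (by omega)
    simp only [← hx]
    simp; omega
  rw [h1, h2, List.nil_append]

theorem pvFilter_hi_nil (y : List Int) (c : Int) (h : (y.length : Int) ≤ c) :
    (pvZeros y).filter (fun z => decide (c ≤ z)) = [] := by
  rw [List.filter_eq_nil_iff]
  intro z hz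
  obtain ⟨k, hk, rfl, -⟩ := (pvZeros_mem y z).mp hz
  simp; omega

theorem pyFindZero_spec (y : List Int) (fuel : Nat) (c : Int) (hc : 0 ≤ c)
    (hf : (y.length : Int) < c + fuel) :
    pyFindZero y fuel c = ((pvZeros y).filter (fun z => decide (c ≤ z))).head? := by
  induction fuel generalizing c with
  | zero =>
    rw [pvFilter_hi_nil y c (by push_cast at hf ⊢; omega)]
    rfl
  | succ fuel ih =>
    rw [pyFindZero]
    by_cases hcl : c < (y.length : Int)
    · rw [PySem.List.pyGet?_eq_some_getElem y hc hcl]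
      by_cases h0 : y[c.toNat] = 0
      · simp only [h0, if_pos rfl]
        have hcmem : c ∈ pvZeros y := by
          rw [pvZeros_mem]
          exact ⟨c.toNat, by omega, by omega, by rw [List.getElem?_eq_getElem (by omega)]; exact congrArg some h0⟩
        exact (pvHead_filter (pvZeros y) (pvZeros_pairwise y) c hcmem).symm
      · simp only [h0, if_neg, if_false]
        rw [ih (c + 1) (by omega) (by push_cast at hf ⊢; omega)]
        congr 1
        apply List.filter_congr
        intro z hz
        obtain ⟨k, hk, rfl, hk0⟩ := (pvZeros_mem y z).mp hz
        have hne : (k : Int) ≠ c := by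
          intro hkc
          rw [List.getElem?_eq_getElem hk] at hk0
          have : y[k] = 0 := by simpa using hk0
          apply h0
          have : k = c.toNat := by omega
          subst this; exact ‹y[c.toNat] = 0›
        simp only [decide_eq_decide]
        omega
    · rw [(PySem.List.pyGet?_eq_none_iff y c).mpr (by unfold PySem.Raise.InRange; omega)]
      rw [pvFilter_hi_nil y c (by omega)]
      rfl

theorem pvConsume (y : List Int) (last : Int) (k : Nat) :
    ∀ (t : Nat) (s : PySem.Set Int) (c : Int), 0 ≤ c →
      (pvZeros y).filter (fun z => decide (c ≤ z)) = (pvZeros y).drop t →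
      t + k ≤ (pvZeros y).length →
      ∃ c' : Int,
        (pvAStep y last)^[k] (some (s, c)) =
          some ((((pvZeros y).drop t).take k).foldl
            (fun s z => if z ≠ last then PySem.Set.add s z else s) s, c') ∧
        0 ≤ c' ∧
        (pvZeros y).filter (fun z => decide (c' ≤ z)) = (pvZeros y).drop (t + k) := by
  induction k with
  | zero =>
    intro t s c hc hinv _
    exact ⟨c, by simp, hc, by simpa using hinv⟩
  | succ k ih =>
    intro t s c hc hinv hbound
    have ht : t < (pvZeros y).length := by omega
    have hdrop := List.drop_eq_getElem_cons ht
    set z := (pvZeros y)[t] with hz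
    have hzmem : z ∈ pvZeros y := List.getElem_mem ht
    have hz0 : 0 ≤ z := by
      obtain ⟨k', -, hzk, -⟩ := (pvZeros_mem y z).mp hzmem
      omega
    have hfind : pyFindZero y (y.length + 1) c = some z := by
      rw [pyFindZero_spec y _ c hc (by push_cast; omega), hinv, hdrop]
      rfl
    have hstep : pvAStep y last (some (s, c)) =
        some ((if z ≠ last then PySem.Set.add s z else s), z + 1) := by
      simp only [pvAStep, hfind]
    have hinv' : (pvZeros y).filter (fun zz => decide (z + 1 ≤ zz)) = (pvZeros y).drop (t + 1) := by
      have := pvFilter_gt_drop (pvZeros y) (pvZeros_pairwise y) t ht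
      rw [← this, ← hz]
      apply List.filter_congr
      intro a _
      simp only [decide_eq_decide]
      omega
    obtain ⟨c', hiter, hc', hfinal⟩ :=
      ih (t + 1) (if z ≠ last then PySem.Set.add s z else s) (z + 1) (by omega) hinv' (by omega)
    refine ⟨c', ?_, hc', by rw [hfinal]; congr 1; omega⟩
    rw [Function.iterate_succ_apply, hstep, hiter]
    congr 2
    rw [hdrop]
    rfl

theorem pvDiscardAdd (x a : Int) (s : PySem.Set Int) :
    PySem.Set.discard (PySem.Set.add s a) x =
      if a = x then PySem.Set.discard s x else PySem.Set.add (PySem.Set.discard s x) a := by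
  have hmem : PySem.Set.contains (PySem.Set.discard s x) a =
      (decide (a ≠ x) && PySem.Set.contains s a) := by
    simp only [PySem.Set.contains, PySem.Set.discard]
    by_cases hax : a = x
    · subst hax
      simp [List.contains_iff_mem, List.mem_filter]
    · simp [List.contains_iff_mem, List.mem_filter, hax]
  by_cases hc : a ∈ s
  all_goals by_cases hax : a = x
  all_goals simp only [PySem.Set.add, PySem.Set.contains, List.contains_iff_mem]
  · subst hax; simp [hc]
  · simp [hc, hax]
  · subst hax; simp [hc, PySem.Set.discard, List.filter_append]
  · simp [hc, hax, PySem.Set.discard, List.filter_append]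

theorem pvDiscardUpdateCongr (x : Int) (l : List Int) :
    ∀ s₁ s₂ : PySem.Set Int, PySem.Set.discard s₁ x = PySem.Set.discard s₂ x →
      PySem.Set.discard (PySem.Set.update s₁ l) x = PySem.Set.discard (PySem.Set.update s₂ l) x := by
  induction l with
  | nil => intro s₁ s₂ h; simpa [PySem.Set.update] using h
  | cons a l ih =>
    intro s₁ s₂ h
    have ha : PySem.Set.discard (PySem.Set.add s₁ a) x = PySem.Set.discard (PySem.Set.add s₂ a) x := by
      rw [pvDiscardAdd, pvDiscardAdd, h]
    simpa [PySem.Set.update] using ih _ _ ha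

theorem pvDiscardUpdate (x : Int) (l : List Int) :
    ∀ s : PySem.Set Int,
      PySem.Set.discard (PySem.Set.update s l) x =
        PySem.Set.discard (l.foldl (fun s z => if z ≠ x then PySem.Set.add s z else s) s) x := by
  induction l with
  | nil => intro s; rfl
  | cons a l ih =>
    intro s
    simp only [PySem.Set.update, List.foldl_cons]
    by_cases hax : a = x
    · subst hax
      have : PySem.Set.discard (PySem.Set.add s a) a = PySem.Set.discard s a := by
        rw [pvDiscardAdd]; simp
      calc PySem.Set.discard (List.foldl PySem.Set.add (PySem.Set.add s a) l) a
          = PySem.Set.discard (List.foldl PySem.Set.add s l) a :=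
            pvDiscardUpdateCongr a l _ _ this
        _ = _ := by simpa [PySem.Set.update] using ih s
    · simp only [if_pos hax]
      simpa [PySem.Set.update] using ih (PySem.Set.add s a)

theorem pvDiscard_not_contains (s : PySem.Set Int) (x : Int)
    (h : PySem.Set.contains s x = false) : PySem.Set.discard s x = s := by
  rw [PySem.Set.discard, List.filter_eq_self]
  intro a ha
  simp only [PySem.Set.contains] at h
  simp
  intro hax
  subst hax
  exact absurd ha (by simpa using h)

theorem pvClientStep (y : List Int) (last nb : Int) (hnb : 0 ≤ nb)
    (d : PySem.Dict Int (PySem.Set Int)) (i c : Int) (s : PySem.Set Int)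
    (hi : 0 ≤ i) (hs : d.get? i = some s) (hc : 0 ≤ c)
    (hinv : (pvZeros y).filter (fun z => decide (c ≤ z)) = (pvZeros y).drop (i * nb).toNat)
    (hbound : ((i + 1) * nb).toNat ≤ (pvZeros y).length) :
    ∃ c' : Int,
      pvAClient y last nb (some (d, c)) i =
        some ((d.insert i (PySem.Set.discard
          (PySem.Set.update s (PySem.List.slice (pvZeros y) (some (i * nb)) (some ((i + 1) * nb)))) last)), c') ∧
      pvBClient (pvZeros y) last nb (some d) i =
        some (d.insert i (PySem.Set.discard
          (PySem.Set.update s (PySem.List.slice (pvZeros y) (some (i * nb)) (some ((i + 1) * nb)))) last)) ∧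
      0 ≤ c' ∧
      (pvZeros y).filter (fun z => decide (c' ≤ z)) = (pvZeros y).drop ((i + 1) * nb).toNat := by
  have hab : 0 ≤ i * nb := mul_nonneg hi hnb
  have hab2 : 0 ≤ (i + 1) * nb := mul_nonneg (by omega) hnb
  have htk : ((i + 1) * nb).toNat = (i * nb).toNat + nb.toNat := by
    have : (i + 1) * nb = i * nb + nb := by ring
    omega
  obtain ⟨c', hiter, hc', hfinal⟩ :=
    pvConsume y last nb.toNat (i * nb).toNat s c hc hinv (by omega)
  have hfold : (PySem.List.pyRange 0 nb 1).foldl (fun acc _ => pvAStep y last acc) (some (s, c)) =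
      (pvAStep y last)^[nb.toNat] (some (s, c)) := by
    rw [List.foldl_const, PySem.List.length_pyRange_one]
    norm_num
  have hslice : PySem.List.slice (pvZeros y) (some (i * nb)) (some ((i + 1) * nb)) =
      (((pvZeros y).drop (i * nb).toNat).take nb.toNat) := by
    rw [PySem.List.slice_toNat _ hab hab2, htk]
    congr 1
    omega
  refine ⟨c', ?_, ?_, hc', by rw [hfinal, htk]⟩
  · simp only [pvAClient, hs, hfold, hiter]
    congr 3
    rw [hslice, pvDiscardUpdate]
    by_cases hcont : PySem.Set.contains ((((pvZeros y).drop (i * nb).toNat).take nb.toNat).foldl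
        (fun s z => if z ≠ last then PySem.Set.add s z else s) s) last
    · rw [if_pos hcont]
    · rw [if_neg hcont, pvDiscard_not_contains _ _ (Bool.eq_false_iff.mpr hcont)]
  · simp only [pvBClient, hs]

theorem pvLoopEq (y : List Int) (last nb n : Int) (hnb : 0 ≤ nb)
    (hglob : n * nb ≤ ((pvZeros y).length : Int)) (m : Nat) :
    ∀ (i0 : Int) (d : PySem.Dict Int (PySem.Set Int)) (c : Int),
      0 ≤ i0 → i0 + m = n →
      (∀ i : Int, 0 ≤ i → i < n → (d.get? i).isSome) →
      0 ≤ c →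
      (pvZeros y).filter (fun z => decide (c ≤ z)) = (pvZeros y).drop (i0 * nb).toNat →
      ∃ (d' : PySem.Dict Int (PySem.Set Int)) (c' : Int),
        (PySem.List.pyRange i0 n 1).foldl (pvAClient y last nb) (some (d, c)) = some (d', c') ∧
        (PySem.List.pyRange i0 n 1).foldl (pvBClient (pvZeros y) last nb) (some d) = some d' := by
  induction m with
  | zero =>
    intro i0 d c hi0 hin hkeys hc hinv
    rw [PySem.List.pyRange_one_eq_nil (by omega)]
    exact ⟨d, c, rfl, rfl⟩
  | succ m ih =>
    intro i0 d c hi0 hin hkeys hc hinv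
    have hi0n : i0 < n := by omega
    rw [PySem.List.pyRange_one_cons hi0n]
    obtain ⟨s, hs⟩ := Option.isSome_iff_exists.mp (hkeys i0 hi0 hi0n)
    have hbound : (((i0 + 1) * nb).toNat : Int) ≤ ((pvZeros y).length : Int) := by
      have h1 : (i0 + 1) * nb ≤ n * nb := by
        apply mul_le_mul_of_nonneg_right _ hnb
        omega
      have h2 : 0 ≤ (i0 + 1) * nb := mul_nonneg (by omega) hnb
      omega
    obtain ⟨c', hA, hB, hc', hinv'⟩ :=
      pvClientStep y last nb hnb d i0 c s hi0 hs hc hinv (by omega)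
    simp only [List.foldl_cons, hA, hB]
    apply ih (i0 + 1) _ c' (by omega) (by omega) _ hc' (by simpa using hinv')
    intro i hi hi2
    by_cases hii : i = i0
    · subst hii
      rw [PySem.Dict.get?_insert_self]
      simp
    · rw [PySem.Dict.get?_insert_of_ne _ _ hii]
      exact hkeys i hi hi2

-- ===== VERDICT helper: the main equivalence =====
theorem pvMain (X y : List Int) (n : Int) (hn0 : n ≠ 0) (hn4 : n ≤ 4)
    (hlen : X.length ≤ y.length) :
    dataset_non_iid X y n = dataset_non_iid_alt X y n := by
  unfold dataset_non_iid dataset_non_iid_alt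
  rw [if_neg hn0, if_neg hn0, if_pos hlen, if_pos hlen]
  have hzl : (PySem.List.count y 0 : Int) = ((pvZeros y).length : Int) := (pvZeros_length y).symm
  rw [hzl]
  by_cases hneg : n < 0
  · rw [PySem.List.pyRange_one_eq_nil (by omega : n ≤ (0:Int))]
    rfl
  · have hn1 : (1:Int) ≤ n := by omega
    have hzn : (0:Int) ≤ ((pvZeros y).length : Int) := by positivity
    have htd : PySem.Int.truncdiv ((pvZeros y).length : Int) n = ((pvZeros y).length : Int) / n := by
      unfold PySem.Int.truncdiv
      exact Int.tdiv_eq_ediv_of_nonneg hzn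
    have hnb : 0 ≤ PySem.Int.truncdiv ((pvZeros y).length : Int) n := by
      rw [htd]; exact Int.ediv_nonneg hzn (by omega)
    have hglob : n * PySem.Int.truncdiv ((pvZeros y).length : Int) n ≤ ((pvZeros y).length : Int) := by
      rw [htd, mul_comm]
      exact Int.ediv_mul_le _ (by omega)
    have hkeys : ∀ i : Int, 0 ≤ i → i < n → ((pvLabelDict X y).get? i).isSome := by
      intro i hi hi2
      have : i = 0 ∨ i = 1 ∨ i = 2 ∨ i = 3 := by omega
      unfold pvLabelDict
      rcases this with rfl | rfl | rfl | rfl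
      · rw [PySem.Dict.get?_insert_of_ne _ _ (by decide), PySem.Dict.get?_insert_of_ne _ _ (by decide),
            PySem.Dict.get?_insert_of_ne _ _ (by decide), PySem.Dict.get?_insert_self]
        simp
      · rw [PySem.Dict.get?_insert_of_ne _ _ (by decide), PySem.Dict.get?_insert_of_ne _ _ (by decide),
            PySem.Dict.get?_insert_self]
        simp
      · rw [PySem.Dict.get?_insert_of_ne _ _ (by decide), PySem.Dict.get?_insert_self]
        simp
      · rw [PySem.Dict.get?_insert_self]
        simp
    have hinv0 : (pvZeros y).filter (fun z => decide ((0:Int) ≤ z)) =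
        (pvZeros y).drop ((0:Int) * PySem.Int.truncdiv ((pvZeros y).length : Int) n).toNat := by
      rw [show ((0:Int) * PySem.Int.truncdiv ((pvZeros y).length : Int) n).toNat = 0 by simp,
          List.drop_zero, List.filter_eq_self]
      intro a ha
      obtain ⟨k, -, rfl, -⟩ := (pvZeros_mem y a).mp ha
      simp
    obtain ⟨d', c', hA, hB⟩ :=
      pvLoopEq y ((X.length : Int) - 1) (PySem.Int.truncdiv ((pvZeros y).length : Int) n) n hnb hglob
        n.toNat 0 (pvLabelDict X y) 0 le_rfl (by omega) hkeys le_rfl hinv0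
    dsimp only
    rw [hA, hB]

-- ===== VERDICT (by name: the statement is the Claim_ definition above) =====
theorem dataset_non_iid_spec : Claim_equal_dataset_non_iid := by
  intro X y n _hDom hPre
  obtain ⟨hn0, hn4, hlen⟩ := hPre
  unfold Spec_dataset_non_iid
  exact pvMain X y n hn0 hn4 hlen
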